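-- pv_equiv track=rewrite | github.com/rbernardy/PDF_Accessibility_rrb_fork_try_two | lambda/pdf-report-generator/main.py | collect_all_columns
-- ===== SOURCE A (Python) =====
-- from typing import Dict, List, Optional, Any
--
-- def collect_all_columns(rows: List[Dict]) -> List[str]:
--     """
--     Collect all unique column names from all rows.
--
--     Orders columns as:
--     1. Basic file info columns
--     2. Status columns (report found, errors)
--     3. All 'before' columns (in order they appear in JSON)
--     4. All 'after' columns (in order they appear in JSON)
--
--     Args:
--         rows: List of row dictionaries
--
--     Returns:
--         Ordered list of all unique column names
--     """
--     # Use a list to preserve order of first appearance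
--     all_columns_ordered = []
--     seen = set()
--
--     for row in rows:
--         for key in row.keys():
--             if key not in seen:
--                 all_columns_ordered.append(key)
--                 seen.add(key)
--
--     # Define column groups
--     basic_cols = ['file-path', 'file-name', 'original-filename', 'folder-path',
--                   'file-size-bytes', 'last-modified', 'page-count']
--
--     # Status columns - these come right after basic info
--     status_cols = ['before-report-found', 'before-report-error', 'before-error-type',
--                    'before-error-message', 'before-error-timestamp', 'after-report-found']
--
--     # Separate before and after columns (excluding status cols) - preserve order
--     before_cols = [c for c in all_columns_ordered
--                    if c.startswith('before') and c not in status_cols]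
--     after_cols = [c for c in all_columns_ordered
--                   if c.startswith('after') and c not in status_cols]
--
--     # Any other columns that don't fit the above categories - preserve order
--     other_cols = [c for c in all_columns_ordered
--                   if c not in basic_cols
--                   and c not in status_cols
--                   and not c.startswith('before')
--                   and not c.startswith('after')]
--
--     # Filter status_cols to only include those that exist
--     status_cols = [c for c in status_cols if c in seen]
--     # Filter basic_cols to only include those that exist
--     basic_cols = [c for c in basic_cols if c in seen]
--
--     # Final order: basic -> status -> other -> before -> after
--     return basic_cols + status_cols + other_cols + before_cols + after_cols
-- ===== SOURCE B (Python) =====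
-- from typing import Dict, List
--
-- BASIC_COLS = ['file-path', 'file-name', 'original-filename', 'folder-path',
--               'file-size-bytes', 'last-modified', 'page-count']
--
-- STATUS_COLS = ['before-report-found', 'before-report-error', 'before-error-type',
--                'before-error-message', 'before-error-timestamp', 'after-report-found']
--
--
-- def collect_all_columns(rows: List[Dict]) -> List[str]:
--     """Decorate-sort-undecorate: dedupe the keys once, then ONE stable sort by a
--     numeric rank that encodes (category, position-within-category)."""
--     keys = list(dict.fromkeys(k for row in rows for k in row.keys()))
--     width = len(keys) + 16
--
--     def sort_key(pair):
--         i, k = pair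
--         if k in BASIC_COLS:
--             return BASIC_COLS.index(k)              # 0..6
--         if k in STATUS_COLS:
--             return 7 + STATUS_COLS.index(k)         # 7..12
--         if k.startswith('before'):
--             return 14 * width + i
--         if k.startswith('after'):
--             return 15 * width + i
--         return 13 * width + i                       # other
--
--     return [k for _, k in sorted(enumerate(keys), key=sort_key)]
-- ===== Notes on version B (the rewrite author's own statement) =====
-- stated objective: alternative
-- what changed: Replaced A's bucket-building (collect keys, then five separate filter scans concatenated) with decorate-sort-undecorate: dedupe the keys once and do ONE stable sort of the enumerated keys by a numeric rank encoding (category, position-within-category).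
import Mathlib
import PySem

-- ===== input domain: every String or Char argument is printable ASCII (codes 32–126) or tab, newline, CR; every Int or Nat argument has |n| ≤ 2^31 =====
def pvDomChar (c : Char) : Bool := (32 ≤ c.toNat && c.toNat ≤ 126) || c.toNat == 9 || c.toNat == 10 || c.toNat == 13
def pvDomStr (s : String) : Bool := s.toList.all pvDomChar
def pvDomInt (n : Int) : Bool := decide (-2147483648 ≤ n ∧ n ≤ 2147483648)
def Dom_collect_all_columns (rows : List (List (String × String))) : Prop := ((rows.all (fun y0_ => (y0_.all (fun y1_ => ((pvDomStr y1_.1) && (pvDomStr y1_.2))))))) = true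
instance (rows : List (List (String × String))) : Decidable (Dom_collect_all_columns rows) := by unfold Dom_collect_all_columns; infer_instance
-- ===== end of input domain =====

-- B replaces A's five bucket/filter passes by decorate-sort-undecorate: dedupe the keys once,
-- then one stable sort of the enumerated keys by a numeric category rank; objective: alternative.

-- ===== PORT A =====
def pvABasicCols : List String :=
  ["file-path", "file-name", "original-filename", "folder-path",
   "file-size-bytes", "last-modified", "page-count"]

def pvAStatusCols : List String :=
  ["before-report-found", "before-report-error", "before-error-type",
   "before-error-message", "before-error-timestamp", "after-report-found"]

-- 'if key not in seen: append; seen.add(key)' — state (all_columns_ordered, seen)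
def pvAStep (st : List String × PySem.Set String) (key : String) :
    List String × PySem.Set String :=
  if PySem.Set.contains st.2 key then st
  else (st.1 ++ [key], PySem.Set.add st.2 key)

def collect_all_columns (rows : List (List (String × String))) : List String :=
  let st := rows.foldl (fun st row => row.foldl (fun st p => pvAStep st p.1) st)
              ([], PySem.Set.empty)
  let all_columns_ordered := st.1
  let seen := st.2
  let before_cols := all_columns_ordered.filter
    (fun c => PySem.Str.startswith c "before" && !(pvAStatusCols.contains c))
  let after_cols := all_columns_ordered.filter
    (fun c => PySem.Str.startswith c "after" && !(pvAStatusCols.contains c))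
  let other_cols := all_columns_ordered.filter
    (fun c => !(pvABasicCols.contains c) && !(pvAStatusCols.contains c)
      && !(PySem.Str.startswith c "before") && !(PySem.Str.startswith c "after"))
  let status_cols := pvAStatusCols.filter (fun c => PySem.Set.contains seen c)
  let basic_cols := pvABasicCols.filter (fun c => PySem.Set.contains seen c)
  basic_cols ++ status_cols ++ other_cols ++ before_cols ++ after_cols

-- ===== PORT B =====
def pvBBasicCols : List String :=
  ["file-path", "file-name", "original-filename", "folder-path",
   "file-size-bytes", "last-modified", "page-count"]

def pvBStatusCols : List String :=
  ["before-report-found", "before-report-error", "before-error-type",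
   "before-error-message", "before-error-timestamp", "after-report-found"]

-- Source B's nested 'sort_key' (captures 'width'); list.index is guarded by the membership test
def pvBSortKey (width : Int) (pair : Int × String) : Int :=
  let i := pair.1
  let k := pair.2
  if pvBBasicCols.contains k then ((PySem.List.index? pvBBasicCols k).getD 0 : Int)
  else if pvBStatusCols.contains k then 7 + ((PySem.List.index? pvBStatusCols k).getD 0 : Int)
  else if PySem.Str.startswith k "before" then 14 * width + i
  else if PySem.Str.startswith k "after" then 15 * width + i
  else 13 * width + i

def collect_all_columns_alt (rows : List (List (String × String))) : List String :=
  let keys := PySem.List.dedup (rows.flatMap (fun row => row.map Prod.fst))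
  let width : Int := (keys.length : Int) + 16
  (PySem.List.sorted (PySem.List.enumerate keys 0) (pvBSortKey width)).map Prod.snd

-- ===== PRECONDITION & SPEC =====
def Spec_collect_all_columns (rows : List (List (String × String))) (out : List String) : Prop := out = collect_all_columns_alt rows
instance (rows : List (List (String × String))) (out : List String) : Decidable (Spec_collect_all_columns rows out) := by unfold Spec_collect_all_columns; infer_instance

-- ===== CLAIM (what is proved, stated in full; the proofs are below) =====
def Claim_equal_collect_all_columns : Prop := ∀ (rows : List (List (String × String))), Dom_collect_all_columns rows → Spec_collect_all_columns rows (collect_all_columns rows)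

-- ===== LEMMAS AND PROOFS =====

-- the five category predicates, as A tests them
def pvInB (c : String) : Bool := pvABasicCols.contains c
def pvInS (c : String) : Bool := pvAStatusCols.contains c
def pvPB (c : String) : Bool :=
  PySem.Str.startswith c "before" && !(pvAStatusCols.contains c)
def pvPA (c : String) : Bool :=
  PySem.Str.startswith c "after" && !(pvAStatusCols.contains c)
def pvPO (c : String) : Bool :=
  !(pvABasicCols.contains c) && !(pvAStatusCols.contains c)
    && !(PySem.Str.startswith c "before") && !(PySem.Str.startswith c "after")

-- index of a key inside a list, as an Int (the sort key's second component)
def pvIdx (U : List String) (k : String) : Int := (List.idxOf k U : Int)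
def pvDec (U : List String) (k : String) : Int × String := (pvIdx U k, k)

lemma startswith_disjoint (l : List Char)
    (h : PySem.Chars.startswith l ['b', 'e', 'f', 'o', 'r', 'e'] = true) :
    PySem.Chars.startswith l ['a', 'f', 't', 'e', 'r'] = false := by
  by_contra hn
  rw [Bool.not_eq_false] at hn
  rw [PySem.Chars.startswith_iff] at h hn
  rcases h with ⟨t1, h1⟩
  rcases hn with ⟨t2, h2⟩
  rw [← h1] at h2
  simp at h2

-- nested fold over rows = fold over flattened key list
lemma foldl_rows {σ : Type} (g : σ → String → σ)
    (rows : List (List (String × String))) (init : σ) :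
    rows.foldl (fun st row => row.foldl (fun st p => g st p.1) st) init
      = (rows.flatMap (fun r => r.map Prod.fst)).foldl g init := by
  induction rows generalizing init with
  | nil => rfl
  | cons r rs ih =>
      simp [List.flatMap_cons, List.foldl_append, List.foldl_map, ih]

lemma add_mem (S : PySem.Set String) (k : String) (hk : k ∈ S) :
    PySem.Set.add S k = S := by
  simp [PySem.Set.add, PySem.Set.contains, hk]

lemma add_not_mem (S : PySem.Set String) (k : String) (hk : ¬ k ∈ S) :
    PySem.Set.add S k = S ++ [k] := by
  simp [PySem.Set.add, PySem.Set.contains, hk]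

-- A's loop invariant: list and seen-set coincide; the fold is Set.update
lemma afold (ks : List String) (S : PySem.Set String) :
    ks.foldl pvAStep (S, S) = (PySem.Set.update S ks, PySem.Set.update S ks) := by
  induction ks generalizing S with
  | nil => rfl
  | cons k ks ih =>
      rw [List.foldl_cons]
      have hstep : pvAStep (S, S) k = (PySem.Set.add S k, PySem.Set.add S k) := by
        by_cases hk : k ∈ S
        · rw [add_mem S k hk]; simp [pvAStep, PySem.Set.contains, hk]
        · rw [add_not_mem S k hk]; simp [pvAStep, PySem.Set.contains, hk]
      rw [hstep, ih]
      rfl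

lemma idx_lt (U : List String) (k : String) (h : k ∈ U) :
    pvIdx U k < (U.length : Int) := by
  unfold pvIdx
  exact_mod_cast List.idxOf_lt_length_of_mem h

lemma idx_nonneg (U : List String) (k : String) : 0 ≤ pvIdx U k := by
  unfold pvIdx; positivity

-- a nodup list is strictly increasing under its own index
lemma pairwise_idx (U : List String) (h : U.Nodup) :
    U.Pairwise (fun a b => pvIdx U a < pvIdx U b) := by
  rw [List.pairwise_iff_getElem]
  intro i j hi hj hij
  unfold pvIdx
  rw [List.Nodup.idxOf_getElem h i hi, List.Nodup.idxOf_getElem h j hj]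
  exact_mod_cast hij

-- enumerate of a nodup list decorates each element with its index
lemma enum_eq_map_dec (U : List String) (h : U.Nodup) (s : Int) :
    PySem.List.enumerate U s = U.map (fun k => (s + pvIdx U k, k)) := by
  induction U generalizing s with
  | nil => simp [PySem.List.enumerate_nil]
  | cons x xs ih =>
      rcases List.nodup_cons.mp h with ⟨hx, hxs⟩
      rw [PySem.List.enumerate_cons, ih hxs (s + 1)]
      simp only [List.map_cons]
      congr 1
      · simp [pvIdx]
      · apply List.map_congr_left
        intro a ha
        have hax : x ≠ a := fun e => hx (e ▸ ha)
        simp only [pvIdx, List.idxOf_cons_ne xs hax, Prod.mk.injEq]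
        push_cast
        ring_nf
        exact ⟨trivial, trivial⟩


-- facts about the two constant column lists, checked by computation
lemma basic_nodup : pvABasicCols.Nodup := by decide
lemma status_nodup : pvAStatusCols.Nodup := by decide
lemma status_not_basic : ∀ c ∈ pvAStatusCols, c ∉ pvABasicCols := by decide
lemma basic_not_before : ∀ c ∈ pvABasicCols, PySem.Str.startswith c "before" = false := by decide
lemma basic_not_after : ∀ c ∈ pvABasicCols, PySem.Str.startswith c "after" = false := by decide
lemma basic_pairwise_key : pvABasicCols.Pairwise (fun a b =>
    ((PySem.List.index? pvABasicCols a).getD 0 : Int)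
      < ((PySem.List.index? pvABasicCols b).getD 0 : Int)) := by decide
lemma status_pairwise_key : pvAStatusCols.Pairwise (fun a b =>
    ((PySem.List.index? pvAStatusCols a).getD 0 : Int)
      < ((PySem.List.index? pvAStatusCols b).getD 0 : Int)) := by decide
lemma basic_key_lt : ∀ c ∈ pvABasicCols, ((PySem.List.index? pvABasicCols c).getD 0 : Int) < 7 := by decide
lemma status_key_lt : ∀ c ∈ pvAStatusCols, ((PySem.List.index? pvAStatusCols c).getD 0 : Int) < 6 := by decide

-- predicate implications used to evaluate the sort key's if-chain
lemma before_imp_not_basic (c : String) (h : PySem.Str.startswith c "before" = true) :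
    pvABasicCols.contains c = false := by
  by_contra hn
  rw [Bool.not_eq_false] at hn
  have hc := List.mem_of_elem_eq_true hn
  rw [basic_not_before c hc] at h
  simp at h

lemma after_imp_not_basic (c : String) (h : PySem.Str.startswith c "after" = true) :
    pvABasicCols.contains c = false := by
  by_contra hn
  rw [Bool.not_eq_false] at hn
  have hc := List.mem_of_elem_eq_true hn
  rw [basic_not_after c hc] at h
  simp at h

lemma after_imp_not_before (c : String)
    (h : PySem.Str.startswith c "after" = true) :
    PySem.Str.startswith c "before" = false := by
  by_contra hn
  rw [Bool.not_eq_false] at hn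
  have h' : PySem.Chars.startswith c.toList ['b','e','f','o','r','e'] = true := by
    simpa using hn
  have h2 := startswith_disjoint c.toList h'
  have h3 : PySem.Chars.startswith c.toList ['a','f','t','e','r'] = true := by
    simpa using h
  rw [h3] at h2
  simp at h2

-- evaluations of the sort key on each category
lemma key_basic (w : Int) (p : Int × String) (h : pvABasicCols.contains p.2 = true) :
    pvBSortKey w p = ((PySem.List.index? pvABasicCols p.2).getD 0 : Int) := by
  show pvBSortKey w p = ((PySem.List.index? pvBBasicCols p.2).getD 0 : Int)
  have hm : p.2 ∈ pvBBasicCols := List.mem_of_elem_eq_true h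
  simp [pvBSortKey, hm]

lemma key_status (w : Int) (p : Int × String)
    (h : pvAStatusCols.contains p.2 = true) :
    pvBSortKey w p = 7 + ((PySem.List.index? pvAStatusCols p.2).getD 0 : Int) := by
  show pvBSortKey w p = 7 + ((PySem.List.index? pvBStatusCols p.2).getD 0 : Int)
  have hm : p.2 ∈ pvBStatusCols := List.mem_of_elem_eq_true h
  have hnb : p.2 ∉ pvBBasicCols := status_not_basic p.2 (List.mem_of_elem_eq_true h)
  simp [pvBSortKey, hm, hnb]

lemma key_before (w : Int) (p : Int × String)
    (hb : PySem.Str.startswith p.2 "before" = true)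
    (hs : pvAStatusCols.contains p.2 = false) :
    pvBSortKey w p = 14 * w + p.1 := by
  have hnb : p.2 ∉ pvBBasicCols := by
    simpa [List.contains_eq_mem] using before_imp_not_basic p.2 hb
  have hns : p.2 ∉ pvBStatusCols := by
    simpa [List.contains_eq_mem] using hs
  have hbC : PySem.Chars.startswith p.2.toList ['b','e','f','o','r','e'] = true := by
    simpa using hb
  simp [pvBSortKey, hnb, hns, hbC]

lemma key_after (w : Int) (p : Int × String)
    (ha : PySem.Str.startswith p.2 "after" = true)
    (hs : pvAStatusCols.contains p.2 = false) :
    pvBSortKey w p = 15 * w + p.1 := by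
  have hnb : p.2 ∉ pvBBasicCols := by
    simpa [List.contains_eq_mem] using after_imp_not_basic p.2 ha
  have hns : p.2 ∉ pvBStatusCols := by
    simpa [List.contains_eq_mem] using hs
  have haC : PySem.Chars.startswith p.2.toList ['a','f','t','e','r'] = true := by
    simpa using ha
  have hbefC : PySem.Chars.startswith p.2.toList ['b','e','f','o','r','e'] = false := by
    simpa using after_imp_not_before p.2 ha
  simp [pvBSortKey, hnb, hns, haC, hbefC]

lemma key_other (w : Int) (p : Int × String) (h : pvPO p.2 = true) :
    pvBSortKey w p = 13 * w + p.1 := by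
  simp only [pvPO, Bool.and_eq_true, Bool.not_eq_true'] at h
  obtain ⟨⟨⟨hB, hS⟩, hbef⟩, haft⟩ := h
  have hnb : p.2 ∉ pvBBasicCols := by
    simpa [List.contains_eq_mem] using hB
  have hns : p.2 ∉ pvBStatusCols := by
    simpa [List.contains_eq_mem] using hS
  have hbefC : PySem.Chars.startswith p.2.toList ['b','e','f','o','r','e'] = false := by
    simpa using hbef
  have haftC : PySem.Chars.startswith p.2.toList ['a','f','t','e','r'] = false := by
    simpa using haft
  simp [pvBSortKey, hnb, hns, hbefC, haftC]

-- the master lemma: B's stable sort of the enumerated unique keys equals A's concatenation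
lemma sorted_eq_concat (U : List String) (hU : U.Nodup) :
    (PySem.List.sorted (PySem.List.enumerate U 0)
        (pvBSortKey ((U.length : Int) + 16))).map Prod.snd
      = pvABasicCols.filter (fun c => U.contains c)
        ++ pvAStatusCols.filter (fun c => U.contains c)
        ++ U.filter pvPO ++ U.filter pvPB ++ U.filter pvPA := by
  have hn0 : (0 : Int) ≤ (U.length : Int) := by positivity
  set w : Int := (U.length : Int) + 16 with hw
  set Bas := pvABasicCols.filter (fun c => U.contains c) with hBas
  set Sta := pvAStatusCols.filter (fun c => U.contains c) with hSta
  set Oth := U.filter pvPO with hOth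
  set Bef := U.filter pvPB with hBef
  set Aft := U.filter pvPA with hAft
  set Acat := Bas ++ Sta ++ Oth ++ Bef ++ Aft with hAcat
  -- enumerate U 0 is U decorated with its own indices
  have henum : PySem.List.enumerate U 0 = U.map (pvDec U) := by
    rw [enum_eq_map_dec U hU 0]
    exact List.map_congr_left (fun a _ => by simp [pvDec])
  -- Acat is a permutation of U
  have hperm : Acat.Perm U := by
    have pBas : Bas.Perm (U.filter (fun c => pvABasicCols.contains c)) := by
      refine (List.perm_ext_iff_of_nodup (basic_nodup.filter _) (hU.filter _)).mpr ?_
      intro a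
      simp only [List.mem_filter, List.contains_eq_mem, decide_eq_true_eq]
      tauto
    have pSta : Sta.Perm (U.filter (fun c => pvAStatusCols.contains c && !pvABasicCols.contains c)) := by
      refine (List.perm_ext_iff_of_nodup (status_nodup.filter _) (hU.filter _)).mpr ?_
      intro a
      simp only [List.mem_filter, Bool.and_eq_true, Bool.not_eq_true',
        List.contains_eq_mem, decide_eq_true_eq, decide_eq_false_iff_not]
      constructor
      · rintro ⟨h1, h2⟩; exact ⟨h2, h1, status_not_basic a h1⟩
      · rintro ⟨h1, h2, h3⟩; exact ⟨h2, h1⟩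
    -- partition chain on U
    have c1 := List.filter_append_perm (fun c => pvABasicCols.contains c) U
    have c2 := List.filter_append_perm (fun c => pvAStatusCols.contains c)
      (U.filter (fun c => !pvABasicCols.contains c))
    have c3 := List.filter_append_perm (fun c => PySem.Str.startswith c "before")
      (U.filter (fun c => !pvAStatusCols.contains c && !pvABasicCols.contains c))
    have c4 := List.filter_append_perm (fun c => PySem.Str.startswith c "after")
      (U.filter (fun c => !PySem.Str.startswith c "before"
        && (!pvAStatusCols.contains c && !pvABasicCols.contains c)))
    simp only [List.filter_filter] at c2 c3 c4
    -- identify the chain's pieces with A's blocks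
    have eBef : U.filter (fun c => PySem.Str.startswith c "before"
        && (!pvAStatusCols.contains c && !pvABasicCols.contains c)) = Bef := by
      rw [hBef]
      refine List.filter_congr (fun x _ => ?_)
      simp only [pvPB]
      cases hb : PySem.Str.startswith x "before"
      · simp
      · have hB' : x ∉ pvABasicCols := by
          simpa [List.contains_eq_mem] using before_imp_not_basic x hb
        simp [hB']
    have eAft : U.filter (fun c => PySem.Str.startswith c "after"
        && (!PySem.Str.startswith c "before"
          && (!pvAStatusCols.contains c && !pvABasicCols.contains c))) = Aft := by
      rw [hAft]
      refine List.filter_congr (fun x _ => ?_)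
      simp only [pvPA]
      cases ha : PySem.Str.startswith x "after"
      · simp
      · have hB' : x ∉ pvABasicCols := by
          simpa [List.contains_eq_mem] using after_imp_not_basic x ha
        have hbef' : PySem.Chars.startswith x.toList ['b','e','f','o','r','e'] = false := by
          simpa using after_imp_not_before x ha
        simp [hB', hbef']
    have eOth : U.filter (fun c => !PySem.Str.startswith c "after"
        && (!PySem.Str.startswith c "before"
          && (!pvAStatusCols.contains c && !pvABasicCols.contains c))) = Oth := by
      rw [hOth]
      refine List.filter_congr (fun x _ => ?_)
      simp only [pvPO]
      cases pvABasicCols.contains x <;> cases pvAStatusCols.contains x <;>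
        cases PySem.Str.startswith x "before" <;> cases PySem.Str.startswith x "after" <;> rfl
    rw [eBef] at c3
    rw [eAft, eOth] at c4
    -- reassemble
    have step4 : (Bef ++ (Aft ++ Oth)).Perm
        (U.filter (fun c => !pvAStatusCols.contains c && !pvABasicCols.contains c)) :=
      (List.Perm.append_left Bef c4).trans c3
    have step3 : ((U.filter (fun c => pvAStatusCols.contains c && !pvABasicCols.contains c))
        ++ (Bef ++ (Aft ++ Oth))).Perm (U.filter (fun c => !pvABasicCols.contains c)) :=
      (List.Perm.append_left _ step4).trans c2
    have step2 : ((U.filter (fun c => pvABasicCols.contains c))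
        ++ ((U.filter (fun c => pvAStatusCols.contains c && !pvABasicCols.contains c))
        ++ (Bef ++ (Aft ++ Oth)))).Perm U :=
      (List.Perm.append_left _ step3).trans c1
    have reorder : (Oth ++ (Bef ++ Aft)).Perm (Bef ++ (Aft ++ Oth)) := by
      have h := List.perm_append_comm (l₁ := Oth) (l₂ := Bef ++ Aft)
      simpa [List.append_assoc] using h
    have h0 : Acat.Perm ((U.filter (fun c => pvABasicCols.contains c))
        ++ ((U.filter (fun c => pvAStatusCols.contains c && !pvABasicCols.contains c))
        ++ (Bef ++ (Aft ++ Oth)))) := by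
      rw [hAcat]
      simp only [List.append_assoc]
      exact List.Perm.append pBas (List.Perm.append pSta reorder)
    exact h0.trans step2
  -- key bounds on each block
  have hBasKey : ∀ c ∈ Bas, pvBSortKey w (pvDec U c)
      = ((PySem.List.index? pvABasicCols c).getD 0 : Int) ∧
      ((PySem.List.index? pvABasicCols c).getD 0 : Int) < 7 ∧
      0 ≤ ((PySem.List.index? pvABasicCols c).getD 0 : Int) := by
    intro c hc
    rw [hBas, List.mem_filter] at hc
    exact ⟨key_basic w _ (List.elem_eq_true_of_mem hc.1), basic_key_lt c hc.1, by positivity⟩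
  have hStaKey : ∀ c ∈ Sta, pvBSortKey w (pvDec U c)
      = 7 + ((PySem.List.index? pvAStatusCols c).getD 0 : Int) ∧
      ((PySem.List.index? pvAStatusCols c).getD 0 : Int) < 6 ∧
      0 ≤ ((PySem.List.index? pvAStatusCols c).getD 0 : Int) := by
    intro c hc
    rw [hSta, List.mem_filter] at hc
    exact ⟨key_status w _ (List.elem_eq_true_of_mem hc.1), status_key_lt c hc.1, by positivity⟩
  have hOthKey : ∀ c ∈ Oth, pvBSortKey w (pvDec U c) = 13 * w + pvIdx U c ∧
      pvIdx U c < (U.length : Int) ∧ 0 ≤ pvIdx U c := by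
    intro c hc
    rw [hOth, List.mem_filter] at hc
    exact ⟨key_other w _ hc.2, idx_lt U c hc.1, idx_nonneg U c⟩
  have hBefKey : ∀ c ∈ Bef, pvBSortKey w (pvDec U c) = 14 * w + pvIdx U c ∧
      pvIdx U c < (U.length : Int) ∧ 0 ≤ pvIdx U c := by
    intro c hc
    rw [hBef, List.mem_filter] at hc
    have h2 := hc.2
    simp only [pvPB, Bool.and_eq_true, Bool.not_eq_true'] at h2
    exact ⟨key_before w _ h2.1 h2.2, idx_lt U c hc.1, idx_nonneg U c⟩
  have hAftKey : ∀ c ∈ Aft, pvBSortKey w (pvDec U c) = 15 * w + pvIdx U c ∧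
      pvIdx U c < (U.length : Int) ∧ 0 ≤ pvIdx U c := by
    intro c hc
    rw [hAft, List.mem_filter] at hc
    have h2 := hc.2
    simp only [pvPA, Bool.and_eq_true, Bool.not_eq_true'] at h2
    exact ⟨key_after w _ h2.1 h2.2, idx_lt U c hc.1, idx_nonneg U c⟩
  -- pairwise strict increase of the key along Acat
  have hpair : Acat.Pairwise
      (fun a b => pvBSortKey w (pvDec U a) < pvBSortKey w (pvDec U b)) := by
    have pwBas : Bas.Pairwise
        (fun a b => pvBSortKey w (pvDec U a) < pvBSortKey w (pvDec U b)) := by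
      refine (basic_pairwise_key.filter _).imp_of_mem ?_
      intro a b ha hb hr
      rw [(hBasKey a ha).1, (hBasKey b hb).1]; exact hr
    have pwSta : Sta.Pairwise
        (fun a b => pvBSortKey w (pvDec U a) < pvBSortKey w (pvDec U b)) := by
      refine (status_pairwise_key.filter _).imp_of_mem ?_
      intro a b ha hb hr
      rw [(hStaKey a ha).1, (hStaKey b hb).1]; omega
    have pwIdx := pairwise_idx U hU
    have pwOth : Oth.Pairwise
        (fun a b => pvBSortKey w (pvDec U a) < pvBSortKey w (pvDec U b)) := by
      refine (pwIdx.filter _).imp_of_mem ?_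
      intro a b ha hb hr
      rw [(hOthKey a ha).1, (hOthKey b hb).1]; omega
    have pwBef : Bef.Pairwise
        (fun a b => pvBSortKey w (pvDec U a) < pvBSortKey w (pvDec U b)) := by
      refine (pwIdx.filter _).imp_of_mem ?_
      intro a b ha hb hr
      rw [(hBefKey a ha).1, (hBefKey b hb).1]; omega
    have pwAft : Aft.Pairwise
        (fun a b => pvBSortKey w (pvDec U a) < pvBSortKey w (pvDec U b)) := by
      refine (pwIdx.filter _).imp_of_mem ?_
      intro a b ha hb hr
      rw [(hAftKey a ha).1, (hAftKey b hb).1]; omega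
    rw [hAcat]
    simp only [List.append_assoc, List.pairwise_append]
    refine ⟨pwBas, ⟨pwSta, ⟨pwOth, ⟨pwBef, pwAft, ?_⟩, ?_⟩, ?_⟩, ?_⟩
    · -- Bef vs Aft
      intro a ha b hb
      obtain ⟨e1, l1, g1⟩ := hBefKey a ha
      obtain ⟨e2, l2, g2⟩ := hAftKey b hb
      rw [e1, e2]; omega
    · -- Oth vs Bef/Aft
      intro a ha b hb
      obtain ⟨e1, l1, g1⟩ := hOthKey a ha
      rcases List.mem_append.mp hb with hb | hb
      · obtain ⟨e2, l2, g2⟩ := hBefKey b hb; rw [e1, e2]; omega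
      · obtain ⟨e2, l2, g2⟩ := hAftKey b hb; rw [e1, e2]; omega
    · -- Sta vs Oth/Bef/Aft
      intro a ha b hb
      obtain ⟨e1, l1, g1⟩ := hStaKey a ha
      rcases List.mem_append.mp hb with hb | hb
      · obtain ⟨e2, l2, g2⟩ := hOthKey b hb; rw [e1, e2]; omega
      · rcases List.mem_append.mp hb with hb | hb
        · obtain ⟨e2, l2, g2⟩ := hBefKey b hb; rw [e1, e2]; omega
        · obtain ⟨e2, l2, g2⟩ := hAftKey b hb; rw [e1, e2]; omega
    · -- Bas vs the rest
      intro a ha b hb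
      obtain ⟨e1, l1, g1⟩ := hBasKey a ha
      rcases List.mem_append.mp hb with hb | hb
      · obtain ⟨e2, l2, g2⟩ := hStaKey b hb; rw [e1, e2]; omega
      · rcases List.mem_append.mp hb with hb | hb
        · obtain ⟨e2, l2, g2⟩ := hOthKey b hb; rw [e1, e2]; omega
        · rcases List.mem_append.mp hb with hb | hb
          · obtain ⟨e2, l2, g2⟩ := hBefKey b hb; rw [e1, e2]; omega
          · obtain ⟨e2, l2, g2⟩ := hAftKey b hb; rw [e1, e2]; omega
  -- conclude via the characterisation of the stable sort
  have hsort : PySem.List.sorted (PySem.List.enumerate U 0) (pvBSortKey w)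
      = Acat.map (pvDec U) := by
    refine PySem.List.sorted_eq_of_perm_of_pairwise_lt _ _ _ ?_ ?_
    · rw [henum]; exact hperm.map (pvDec U)
    · rw [List.pairwise_map]; exact hpair
  rw [hsort, List.map_map]
  have hcomp : (Prod.snd ∘ pvDec U) = id := by
    funext k; simp [pvDec]
  rw [hcomp, List.map_id, hAcat]

-- ===== VERDICT (by name: the statement is the Claim_ definition above) =====
theorem collect_all_columns_spec : Claim_equal_collect_all_columns := by
  intro rows _
  unfold Spec_collect_all_columns collect_all_columns collect_all_columns_alt
  have hA := afold (rows.flatMap (fun r => r.map Prod.fst)) []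
  have hEmpty : (PySem.Set.empty : PySem.Set String) = ([] : List String) := rfl
  simp only [foldl_rows pvAStep, hEmpty, hA]
  rw [PySem.List.dedup_eq_ofList]
  have hofl : PySem.Set.ofList (rows.flatMap (fun r => r.map Prod.fst))
      = PySem.Set.update ([] : PySem.Set String) (rows.flatMap (fun r => r.map Prod.fst)) := rfl
  rw [← hofl]
  have hU := PySem.Set.nodup_ofList (rows.flatMap (fun r => r.map Prod.fst))
  have h := sorted_eq_concat (PySem.Set.ofList (rows.flatMap (fun r => r.map Prod.fst))) hU
  rw [h]
  rfl
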